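-- pv_equiv track=rewrite | github.com/zilongcheng582-cyber/atayal-nlp-summer | src/preprocess.py | encode_and_split
-- ===== SOURCE A (Python) =====
-- def encode_and_split(clean_lines, char2idx, seq_len=50):
--     """编码文本并切成训练对"""
--     full_text = "\n".join(clean_lines)
--     encoded = [char2idx[c] for c in full_text]
--
--     inputs, targets = [], []
--     for i in range(0, len(encoded) - seq_len):
--         inputs.append(encoded[i: i + seq_len])
--         targets.append(encoded[i + 1: i + seq_len + 1])
--
--     return inputs, targets
-- ===== SOURCE B (Python) =====
-- def encode_and_split(clean_lines, char2idx, seq_len=50):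
--     """编码文本并切成训练对 — one streaming pass with a rolling buffer, no index slicing of the encoded list."""
--     inputs, targets = [], []
--     buf = []
--     for c in "\n".join(clean_lines):
--         buf.append(char2idx[c])
--         if len(buf) == seq_len + 1:
--             inputs.append(buf[:-1])
--             targets.append(buf[1:])
--             buf.pop(0)
--     return inputs, targets
-- ===== Notes on version B (the rewrite author's own statement) =====
-- stated objective: alternative
-- what changed: B makes one streaming pass over the joined text, encoding each character on the fly and maintaining a rolling buffer of the last seq_len+1 codes, emitting (buf[:-1], buf[1:]) whenever the buffer fills, instead of A's two-stage encode-then-index-slice loop.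
-- intended difference: For seq_len < 0, A's loop still runs len(encoded)-seq_len times and Python's negative-slice wraparound yields a list of accidental (mostly empty) windows; B returns a pair of empty lists since no window of nonpositive length exists, the intended value for a degenerate sequence length. — e.g. on encode_and_split(["a"], [("a", 7)], -1): A returns ([[], []], [[], []]), B returns ([], [])
import Mathlib
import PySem

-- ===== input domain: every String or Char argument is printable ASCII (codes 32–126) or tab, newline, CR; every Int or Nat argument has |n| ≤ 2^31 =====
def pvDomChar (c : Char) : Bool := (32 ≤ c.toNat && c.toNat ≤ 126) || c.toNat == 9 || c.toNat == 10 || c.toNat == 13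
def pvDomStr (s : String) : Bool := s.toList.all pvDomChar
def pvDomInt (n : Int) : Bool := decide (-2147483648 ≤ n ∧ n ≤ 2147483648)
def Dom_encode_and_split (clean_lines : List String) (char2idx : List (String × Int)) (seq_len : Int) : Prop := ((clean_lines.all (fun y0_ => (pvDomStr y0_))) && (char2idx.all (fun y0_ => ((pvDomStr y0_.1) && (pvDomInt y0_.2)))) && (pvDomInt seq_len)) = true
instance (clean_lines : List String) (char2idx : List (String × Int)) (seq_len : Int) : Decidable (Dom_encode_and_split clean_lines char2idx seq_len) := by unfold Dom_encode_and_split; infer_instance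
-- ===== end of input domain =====

-- B replaces A's encode-then-slice loop by ONE streaming pass with a rolling buffer of the
-- last seq_len+1 codes; return values proved equal for seq_len ≥ 0, intended difference D_ below.

-- ===== PORT A =====
def encode_and_split (clean_lines : List String) (char2idx : List (String × Int)) (seq_len : Int) : List (List Int) × List (List Int) :=
  let full_text := PySem.Str.join "\n" clean_lines
  -- char2idx[c]: first-match dict lookup; KeyError (none) is excluded by Pre_, .getD 0 is never the value inside Pre_
  let encoded := full_text.toList.map (fun c => ((PySem.Dict.mk char2idx).get? (String.mk [c])).getD 0)
  (PySem.List.pyRange 0 ((encoded.length : Int) - seq_len) 1).foldl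
    (fun (p : List (List Int) × List (List Int)) i =>
      (p.1 ++ [PySem.List.slice encoded (some i) (some (i + seq_len))],
       p.2 ++ [PySem.List.slice encoded (some (i + 1)) (some (i + seq_len + 1))]))
    ([], [])

-- ===== PORT B =====
-- one step of B's rolling-buffer loop body: append the code, emit (buf[:-1], buf[1:]) and pop
-- the oldest code when the buffer holds seq_len+1 codes (buf after pop(0) = buf[1:] = buf.tail)
def pvStep (seq_len : Int) (s : List Int × List (List Int) × List (List Int)) (x : Int) :
    List Int × List (List Int) × List (List Int) :=
  let buf := s.1 ++ [x]
  if (buf.length : Int) = seq_len + 1 then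
    (buf.tail, s.2.1 ++ [buf.dropLast], s.2.2 ++ [buf.tail])
  else (buf, s.2.1, s.2.2)

def encode_and_split_alt (clean_lines : List String) (char2idx : List (String × Int)) (seq_len : Int) : List (List Int) × List (List Int) :=
  let r := (PySem.Str.join "\n" clean_lines).toList.foldl
    (fun s c => pvStep seq_len s (((PySem.Dict.mk char2idx).get? (String.mk [c])).getD 0))
    ([], [], [])
  (r.2.1, r.2.2)

-- ===== PRECONDITION & SPEC =====
-- Pre_ excludes exactly the inputs where A raises KeyError: some character of the joined text
-- (a line character, or the "\n" separator when two or more lines are joined) is not a key of char2idx.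
def Pre_encode_and_split (clean_lines : List String) (char2idx : List (String × Int)) (seq_len : Int) : Prop :=
  (clean_lines.all (fun s => s.toList.all (fun c => (PySem.Dict.mk char2idx).contains (String.mk [c])))
    && (decide (clean_lines.length ≤ 1) || (PySem.Dict.mk char2idx).contains "\n")) = true
instance (clean_lines : List String) (char2idx : List (String × Int)) (seq_len : Int) : Decidable (Pre_encode_and_split clean_lines char2idx seq_len) := by unfold Pre_encode_and_split; infer_instance
def pvWitness_encode_and_split : List String × (List (String × Int)) × Int := (["ab", "ba"], [("a", 0), ("b", 1), ("\n", 2)], 2)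

-- For seq_len < 0, A's loop still runs len(encoded)-seq_len times and Python's negative-slice
-- wraparound yields a list of accidental (mostly empty) windows; B returns a pair of empty lists since no
-- window of nonpositive length exists — the intended value for a degenerate sequence length.
def D_encode_and_split (clean_lines : List String) (char2idx : List (String × Int)) (seq_len : Int) : Prop :=
  seq_len < 0
instance (clean_lines : List String) (char2idx : List (String × Int)) (seq_len : Int) : Decidable (D_encode_and_split clean_lines char2idx seq_len) := by unfold D_encode_and_split; infer_instance

def Spec_encode_and_split (clean_lines : List String) (char2idx : List (String × Int)) (seq_len : Int) (out : List (List Int) × List (List Int)) : Prop := ¬ D_encode_and_split clean_lines char2idx seq_len → out = encode_and_split_alt clean_lines char2idx seq_len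
instance (clean_lines : List String) (char2idx : List (String × Int)) (seq_len : Int) (out : List (List Int) × List (List Int)) : Decidable (Spec_encode_and_split clean_lines char2idx seq_len out) := by unfold Spec_encode_and_split; infer_instance

def pvDiffWitness_encode_and_split : List String × (List (String × Int)) × Int := (["a"], [("a", 7)], -1)
def pvDiffWitnessOut_encode_and_split : (List (List Int) × List (List Int)) × (List (List Int) × List (List Int)) := (([[], []], [[], []]), ([], []))

-- ===== CLAIM (what is proved, stated in full; the proofs are below) =====
def Claim_unchanged_encode_and_split : Prop := ∀ (clean_lines : List String) (char2idx : List (String × Int)) (seq_len : Int), Dom_encode_and_split clean_lines char2idx seq_len → Pre_encode_and_split clean_lines char2idx seq_len → Spec_encode_and_split clean_lines char2idx seq_len (encode_and_split clean_lines char2idx seq_len)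
def Claim_changed_encode_and_split : Prop := Dom_encode_and_split (pvDiffWitness_encode_and_split.1) (pvDiffWitness_encode_and_split.2.1) (pvDiffWitness_encode_and_split.2.2) ∧ Pre_encode_and_split (pvDiffWitness_encode_and_split.1) (pvDiffWitness_encode_and_split.2.1) (pvDiffWitness_encode_and_split.2.2) ∧ D_encode_and_split (pvDiffWitness_encode_and_split.1) (pvDiffWitness_encode_and_split.2.1) (pvDiffWitness_encode_and_split.2.2) ∧ encode_and_split (pvDiffWitness_encode_and_split.1) (pvDiffWitness_encode_and_split.2.1) (pvDiffWitness_encode_and_split.2.2) = pvDiffWitnessOut_encode_and_split.1 ∧ encode_and_split_alt (pvDiffWitness_encode_and_split.1) (pvDiffWitness_encode_and_split.2.1) (pvDiffWitness_encode_and_split.2.2) = pvDiffWitnessOut_encode_and_split.2 ∧ pvDiffWitnessOut_encode_and_split.1 ≠ pvDiffWitnessOut_encode_and_split.2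
def Claim_exact_encode_and_split : Prop := ∀ (clean_lines : List String) (char2idx : List (String × Int)) (seq_len : Int), Dom_encode_and_split clean_lines char2idx seq_len → Pre_encode_and_split clean_lines char2idx seq_len → D_encode_and_split clean_lines char2idx seq_len → encode_and_split clean_lines char2idx seq_len ≠ encode_and_split_alt clean_lines char2idx seq_len

-- ===== LEMMAS AND PROOFS =====

lemma pv_foldl_pair (f g : Int → List Int) (r : List Int) :
    ∀ acc : List (List Int) × List (List Int),
      r.foldl (fun p i => (p.1 ++ [f i], p.2 ++ [g i])) acc = (acc.1 ++ r.map f, acc.2 ++ r.map g) := by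
  induction r with
  | nil => intro acc; simp
  | cons a r ih => intro acc; simp [List.foldl, ih]

-- B's rolling-buffer fold, characterised: starting from a buffer b of length ≤ L, folding es
-- emits exactly the sliding windows of t = b ++ es (inputs = take L after each drop, targets shifted by one).
lemma pvStep_emit (q : Int) (s : List Int × List (List Int) × List (List Int)) (x : Int)
    (h : ((s.1 ++ [x]).length : Int) = q + 1) :
    pvStep q s x = ((s.1 ++ [x]).tail, s.2.1 ++ [(s.1 ++ [x]).dropLast], s.2.2 ++ [(s.1 ++ [x]).tail]) := by
  unfold pvStep
  rw [if_pos h]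

lemma pvStep_skip (q : Int) (s : List Int × List (List Int) × List (List Int)) (x : Int)
    (h : ¬ ((s.1 ++ [x]).length : Int) = q + 1) :
    pvStep q s x = (s.1 ++ [x], s.2.1, s.2.2) := by
  unfold pvStep
  rw [if_neg h]

lemma pv_take_left (l1 l2 : List Int) (L : Nat) (h : l1.length = L) : (l1 ++ l2).take L = l1 := by
  subst h; exact List.take_left ..

-- B's rolling-buffer fold, characterised: starting from a buffer b of length ≤ L, folding es
-- emits exactly the sliding windows of t = b ++ es (inputs = take L of each drop, targets shifted by one).
lemma pv_bfold (L : Nat) : ∀ (es b : List Int) (ins tgts : List (List Int)), b.length ≤ L →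
    es.foldl (pvStep (L : Int)) (b, ins, tgts)
    = ((b ++ es).drop ((b ++ es).length - L),
       ins ++ (List.range ((b ++ es).length - L)).map (fun i => ((b ++ es).drop i).take L),
       tgts ++ (List.range ((b ++ es).length - L)).map (fun i => ((b ++ es).drop (i + 1)).take L)) := by
  intro es
  induction es with
  | nil =>
    intro b ins tgts hb
    simp [Nat.sub_eq_zero_of_le hb]
  | cons x es ih =>
    intro b ins tgts hb
    by_cases hbL : b.length = L
    · rw [List.foldl_cons, pvStep_emit _ _ _ (by simp [hbL])]
      rw [ih ((b ++ [x]).tail) _ _ (by simp [hbL])]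
      have htl : (b ++ [x]).tail ++ es = (b ++ x :: es).tail := by
        rcases b with _ | ⟨y, ys⟩ <;> simp
      have hlen : (b ++ x :: es).length = L + 1 + es.length := by
        simp only [List.length_append, List.length_cons, hbL]; omega
      have hlen' : ((b ++ [x]).tail ++ es).length = L + es.length := by
        simp [hbL]
      have hdrop : ∀ m : Nat, ((b ++ [x]).tail ++ es).drop m = (b ++ x :: es).drop (m + 1) := by
        intro m
        rw [htl, ← List.drop_one, List.drop_drop, Nat.add_comm]
      have hr : (b ++ x :: es).length - L = es.length + 1 := by omega
      have hr' : ((b ++ [x]).tail ++ es).length - L = es.length := by omega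
      have h0i : ((b ++ x :: es).drop 0).take L = (b ++ [x]).dropLast := by
        rw [List.drop_zero, show (b ++ [x]).dropLast = b by simp]
        exact pv_take_left b (x :: es) L hbL
      have h0t : ((b ++ x :: es).drop (0 + 1)).take L = (b ++ [x]).tail := by
        rw [← hdrop 0, List.drop_zero]
        exact pv_take_left _ es L (by simp [hbL])
      refine Prod.ext ?_ (Prod.ext ?_ ?_)
      · show ((b ++ [x]).tail ++ es).drop (((b ++ [x]).tail ++ es).length - L)
            = (b ++ x :: es).drop ((b ++ x :: es).length - L)
        rw [hr, hr', hdrop]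
      · show ins ++ [(b ++ [x]).dropLast]
            ++ (List.range (((b ++ [x]).tail ++ es).length - L)).map (fun i => (((b ++ [x]).tail ++ es).drop i).take L)
            = ins ++ (List.range ((b ++ x :: es).length - L)).map (fun i => (((b ++ x :: es)).drop i).take L)
        rw [hr, hr', List.range_succ_eq_map, List.map_cons, List.map_map, h0i,
            List.append_assoc, List.singleton_append]
        congr 2
        apply List.map_congr_left
        intro i _
        simp only [Function.comp_apply, hdrop]
      · show tgts ++ [(b ++ [x]).tail]
            ++ (List.range (((b ++ [x]).tail ++ es).length - L)).map (fun i => (((b ++ [x]).tail ++ es).drop (i + 1)).take L)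
            = tgts ++ (List.range ((b ++ x :: es).length - L)).map (fun i => (((b ++ x :: es)).drop (i + 1)).take L)
        rw [hr, hr', List.range_succ_eq_map, List.map_cons, List.map_map, h0t,
            List.append_assoc, List.singleton_append]
        congr 2
        apply List.map_congr_left
        intro i _
        simp only [Function.comp_apply, hdrop]
    · have hg : ¬ (((b ++ [x]).length : Int) = (L : Int) + 1) := by
        simp only [List.length_append, List.length_cons, List.length_nil]
        omega
      have hlb : (b ++ [x]).length ≤ L := by
        simp only [List.length_append, List.length_cons, List.length_nil]
        omega
      rw [List.foldl_cons, pvStep_skip _ _ _ hg]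
      simpa [List.append_assoc] using ih (b ++ [x]) ins tgts hlb

-- with a nonpositive window size the buffer (nonempty after each append) never reaches seq_len+1,
-- so B's fold never emits anything
lemma pv_bfold_neg (seq_len : Int) (h : seq_len < 0) : ∀ (es b : List Int) (ins tgts : List (List Int)),
    (es.foldl (pvStep seq_len) (b, ins, tgts)).2 = (ins, tgts) := by
  intro es
  induction es with
  | nil => intro b ins tgts; rfl
  | cons x es ih =>
    intro b ins tgts
    have hg : ¬ (((b ++ [x]).length : Int) = seq_len + 1) := by
      simp only [List.length_append, List.length_cons, List.length_nil]
      omega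
    simp only [List.foldl, pvStep, hg, if_false]
    exact ih _ _ _

lemma pv_B_form (clean_lines : List String) (char2idx : List (String × Int)) (seq_len : Int) :
    encode_and_split_alt clean_lines char2idx seq_len
    = (let encoded := (PySem.Str.join "\n" clean_lines).toList.map (fun c => ((PySem.Dict.mk char2idx).get? (String.mk [c])).getD 0)
       let r := encoded.foldl (pvStep seq_len) ([], [], [])
       (r.2.1, r.2.2)) := by
  unfold encode_and_split_alt
  simp only [List.foldl_map]

lemma pv_A_form (clean_lines : List String) (char2idx : List (String × Int)) (seq_len : Int) :
    encode_and_split clean_lines char2idx seq_len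
    = (let encoded := (PySem.Str.join "\n" clean_lines).toList.map (fun c => ((PySem.Dict.mk char2idx).get? (String.mk [c])).getD 0)
       ((PySem.List.pyRange 0 ((encoded.length : Int) - seq_len) 1).map (fun i => PySem.List.slice encoded (some i) (some (i + seq_len))),
        (PySem.List.pyRange 0 ((encoded.length : Int) - seq_len) 1).map (fun i => PySem.List.slice encoded (some (i + 1)) (some (i + seq_len + 1))))) := by
  unfold encode_and_split
  rw [pv_foldl_pair]
  simp

-- A's slice windows over the encoded list coincide with B's fold result for a nonnegative window size
lemma pv_main (encoded : List Int) (L : Nat) :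
    ((PySem.List.pyRange 0 ((encoded.length : Int) - (L : Int)) 1).map
        (fun i => PySem.List.slice encoded (some i) (some (i + (L : Int)))),
     (PySem.List.pyRange 0 ((encoded.length : Int) - (L : Int)) 1).map
        (fun i => PySem.List.slice encoded (some (i + 1)) (some (i + (L : Int) + 1))))
    = (let r := encoded.foldl (pvStep (L : Int)) ([], [], []); (r.2.1, r.2.2)) := by
  simp only
  rw [pv_bfold L encoded [] [] [] (by simp)]
  simp only [List.nil_append]
  have hR : PySem.List.pyRange 0 ((encoded.length : Int) - (L : Int)) 1
      = (List.range (encoded.length - L)).map (fun k : Nat => ((k : Int))) := by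
    rw [PySem.List.pyRange_one]
    have ht : (((encoded.length : Int) - (L : Int)) - 0).toNat = encoded.length - L := by omega
    rw [ht]
    apply List.map_congr_left
    intro k _
    omega
  rw [hR, List.map_map, List.map_map]
  refine Prod.ext ?_ ?_
  · apply List.map_congr_left
    intro k _
    simp only [Function.comp_apply]
    exact PySem.List.slice_natCast_add encoded k L
  · apply List.map_congr_left
    intro k _
    simp only [Function.comp_apply]
    have e1 : ((k : Int)) + 1 = ((k + 1 : Nat) : Int) := by push_cast; ring
    have e2 : ((k : Int)) + (L : Int) + 1 = ((k + 1 : Nat) : Int) + (L : Int) := by push_cast; ring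
    rw [e1, e2]
    exact PySem.List.slice_natCast_add encoded (k + 1) L

-- ===== VERDICT (by name: the statement is the Claim_ definition above) =====
theorem encode_and_split_spec : Claim_unchanged_encode_and_split := by
  intro clean_lines char2idx seq_len _ _
  unfold Spec_encode_and_split
  intro hnD
  unfold D_encode_and_split at hnD
  obtain ⟨L, rfl⟩ : ∃ L : Nat, seq_len = (L : Int) := ⟨seq_len.toNat, by omega⟩
  rw [pv_A_form, pv_B_form]
  simp only
  exact pv_main _ L

theorem encode_and_split_changed : Claim_changed_encode_and_split := by
  unfold Claim_changed_encode_and_split; decide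

theorem encode_and_split_tight : Claim_exact_encode_and_split := by
  intro clean_lines char2idx seq_len _ _ hD heq
  unfold D_encode_and_split at hD
  rw [pv_A_form, pv_B_form] at heq
  simp only [pv_bfold_neg seq_len hD] at heq
  have h1 := congrArg Prod.fst heq
  simp only at h1
  have hlen := congrArg List.length h1
  rw [List.length_map, PySem.List.length_pyRange_one, List.length_nil] at hlen
  omega
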